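-- pv_equiv track=rewrite | github.com/Kenzie-Academy-Brasil-Developers/q3-sprint1-estruturas-de-repeticao-brunotetzner | main.py | remove_more_than_two_repetitions
-- ===== SOURCE A (Python) =====
-- def remove_more_than_two_repetitions(text):
--    new_sentece = text[:2]
--    count = 2
--    while count < len(text):
--        if text[count] != text[count-1] or text[count] != text[count-2]:
--         new_sentece+=text[count]
--        elif text[count] != text[count-2] and text[count] == text[count-1]:
--         new_sentece+=text[count]
--        elif count == len(text)-1 and text[count] == text[count-1] and text[count] != text[count-2]:
--         new_sentece+=text[count]
--        elif count == len(text)-1 and text[count] == text[count-1] and text[count] == text[count-2]: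
--         pass
--        elif text[count] == text[count-1] and text[count] == text[count+1] and text[count-2] !=text[count]:
--         new_sentece+=text[count]
--
--        count+=1
--    return new_sentece
-- ===== SOURCE B (Python) =====
-- def remove_more_than_two_repetitions(text):
--     # Run-grouping: split into maximal runs of equal chars, keep at most 2 of each.
--     out = []
--     i = 0
--     n = len(text)
--     while i < n:
--         j = i
--         while j < n and text[j] == text[i]:
--             j += 1
--         out.append(text[i] * min(j - i, 2))
--         i = j
--     return "".join(out)
-- ===== Notes on version B (the rewrite author's own statement) =====
-- stated objective: faster
-- what changed: Replaces A's index-by-index two-character-lookbehind scan with five tangled branches and per-character string concatenation by a two-pointer run-grouping pass that keeps min(run length, 2) of each maximal run and joins the pieces once.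
import Mathlib
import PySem

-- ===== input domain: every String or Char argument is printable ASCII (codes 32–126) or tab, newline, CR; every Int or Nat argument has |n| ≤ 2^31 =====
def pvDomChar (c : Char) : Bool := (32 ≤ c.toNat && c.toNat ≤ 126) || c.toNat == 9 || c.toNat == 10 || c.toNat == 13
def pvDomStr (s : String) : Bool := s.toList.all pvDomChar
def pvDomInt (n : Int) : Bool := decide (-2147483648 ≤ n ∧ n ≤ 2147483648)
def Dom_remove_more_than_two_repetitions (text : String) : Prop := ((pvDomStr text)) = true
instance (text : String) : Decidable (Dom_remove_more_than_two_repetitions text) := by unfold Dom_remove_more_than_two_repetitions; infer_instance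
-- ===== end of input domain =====

-- B replaces A's index-by-index lookbehind scan (five tangled branches) by a run-grouping
-- two-pointer pass keeping min(run length, 2) of each maximal run; same output, plainer code.

-- ===== PORT A =====
-- the while loop: count scans indices 2..len-1; acc is new_sentece (as a char list)
def pvLoopA (cs : List Char) (count : Nat) (acc : List Char) : List Char :=
  if _ : count < cs.length then
    let g : Int → Char := fun i => PySem.List.pyGetD cs i ' '  -- text[i]; every index used is in range when its branch is evaluated
    let c : Int := count
    let acc' :=
      if g c ≠ g (c - 1) ∨ g c ≠ g (c - 2) then acc ++ [g c]
      else if g c ≠ g (c - 2) ∧ g c = g (c - 1) then acc ++ [g c]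
      else if count = cs.length - 1 ∧ g c = g (c - 1) ∧ g c ≠ g (c - 2) then acc ++ [g c]
      else if count = cs.length - 1 ∧ g c = g (c - 1) ∧ g c = g (c - 2) then acc
      else if g c = g (c - 1) ∧ g c = g (c + 1) ∧ g (c - 2) ≠ g c then acc ++ [g c]
      else acc
    pvLoopA cs (count + 1) acc'
  else acc
termination_by cs.length - count

-- new_sentece = text[:2]; count = 2; then the while loop over the characters of text
def remove_more_than_two_repetitions (text : String) : String :=
  String.mk (pvLoopA text.toList 2 (PySem.List.slice text.toList none (some 2)))

-- ===== PORT B =====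
-- outer while of Source B: take the maximal run at the front (inner while j scan = span), keep min(len,2)
def pvRuns : List Char → List Char
  | [] => []
  | c :: rest =>
    let p := rest.span (· == c)
    List.replicate (min (p.1.length + 1) 2) c ++ pvRuns p.2
termination_by l => l.length
decreasing_by
  simp only [List.span_eq_takeWhile_dropWhile]
  have := List.length_dropWhile_le (· == c) rest
  simp; omega

def remove_more_than_two_repetitions_alt (text : String) : String :=
  String.mk (pvRuns text.toList)

-- ===== PRECONDITION & SPEC =====
def Spec_remove_more_than_two_repetitions (text : String) (out : String) : Prop := out = remove_more_than_two_repetitions_alt text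
instance (text : String) (out : String) : Decidable (Spec_remove_more_than_two_repetitions text out) := by unfold Spec_remove_more_than_two_repetitions; infer_instance

-- ===== CLAIM (what is proved, stated in full; the proofs are below) =====
def Claim_equal_remove_more_than_two_repetitions : Prop := ∀ (text : String), Dom_remove_more_than_two_repetitions text → Spec_remove_more_than_two_repetitions text (remove_more_than_two_repetitions text)

-- ===== LEMMAS AND PROOFS =====

-- canonical middle form: state machine carrying the previous two characters (none = before the string)
def pvSA (p2 p1 : Option Char) : List Char → List Char
  | [] => []
  | c :: rest => (if some c = p1 ∧ some c = p2 then [] else [c]) ++ pvSA p1 (some c) rest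

def pvSimple : List Char → List Char
  | [] => []
  | d :: r => d :: pvSA none (some d) r

-- the char two back is irrelevant unless it equals the previous char
theorem pvSA_congr (p2 p2' p1 : Option Char) (l : List Char)
    (h : p2 ≠ p1) (h' : p2' ≠ p1) : pvSA p2 p1 l = pvSA p2' p1 l := by
  cases l with
  | nil => rfl
  | cons c rest =>
    simp only [pvSA]
    congr 1
    by_cases hc : some c = p1
    · subst hc
      rw [if_neg (fun hh => h hh.2.symm), if_neg (fun hh => h' hh.2.symm)]
    · simp [hc]

-- inside a run of c with both previous chars c, everything is dropped
theorem pvSA_replicate (m : Nat) (c : Char) (rest : List Char) :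
    pvSA (some c) (some c) (List.replicate m c ++ rest) = pvSA (some c) (some c) rest := by
  induction m with
  | zero => rfl
  | succ k ih => simp [List.replicate, pvSA, ih]

-- after a run boundary (head ≠ c), the scan restarts like a fresh string
theorem pvSA_fresh (p2 : Option Char) (c : Char) (dw : List Char)
    (h : ∀ d r, dw = d :: r → d ≠ c) : pvSA p2 (some c) dw = pvSimple dw := by
  cases dw with
  | nil => rfl
  | cons d r =>
    have hd : d ≠ c := h d r rfl
    simp only [pvSA, pvSimple]
    have : ¬ (some d = some c ∧ some d = p2) := fun hh => hd (Option.some_inj.mp hh.1)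
    rw [if_neg this]
    simp only [List.singleton_append, List.cons.injEq, true_and]
    exact pvSA_congr (some c) none (some d) r
      (fun hh => hd (Option.some_inj.mp hh).symm) (by simp)

-- A's loop computes the state machine
theorem pvLoopA_eq (rest : List Char) : ∀ (pre : List Char) (p2 p1 : Char) (acc : List Char),
    pvLoopA (pre ++ p2 :: p1 :: rest) (pre.length + 2) acc = acc ++ pvSA (some p2) (some p1) rest := by
  induction rest with
  | nil =>
    intro pre p2 p1 acc
    rw [pvLoopA]
    simp [pvSA]
  | cons c rest' ih =>
    intro pre p2 p1 acc
    have hlen : (pre ++ p2 :: p1 :: c :: rest').length = pre.length + 3 + rest'.length := by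
      simp; omega
    rw [pvLoopA]
    have hlt : pre.length + 2 < (pre ++ p2 :: p1 :: c :: rest').length := by omega
    rw [dif_pos hlt]
    have gc : PySem.List.pyGetD (pre ++ p2 :: p1 :: c :: rest') ((pre.length + 2 : Nat) : Int) ' ' = c := by
      rw [PySem.List.pyGetD_natCast]
      rw [List.getD_eq_getElem?_getD, List.getElem?_append_right (by omega)]
      simp
    have cast1 : ((pre.length + 2 : Nat) : Int) - 1 = ((pre.length + 1 : Nat) : Int) := by push_cast; ring
    have cast2 : ((pre.length + 2 : Nat) : Int) - 2 = ((pre.length : Nat) : Int) := by push_cast; ring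
    have gp1 : PySem.List.pyGetD (pre ++ p2 :: p1 :: c :: rest') (((pre.length + 2 : Nat) : Int) - 1) ' ' = p1 := by
      rw [cast1, PySem.List.pyGetD_natCast]
      rw [List.getD_eq_getElem?_getD, List.getElem?_append_right (by omega)]
      simp
    have gp2 : PySem.List.pyGetD (pre ++ p2 :: p1 :: c :: rest') (((pre.length + 2 : Nat) : Int) - 2) ' ' = p2 := by
      rw [cast2, PySem.List.pyGetD_natCast]
      rw [List.getD_eq_getElem?_getD, List.getElem?_append_right (by omega)]
      simp
    simp only [gc, gp1, gp2]
    have hstep : ∀ acc'' , pvLoopA (pre ++ p2 :: p1 :: c :: rest') (pre.length + 2 + 1) acc''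
        = acc'' ++ pvSA (some p1) (some c) rest' := by
      intro acc''
      have h1 : pre ++ p2 :: p1 :: c :: rest' = (pre ++ [p2]) ++ p1 :: c :: rest' := by simp
      have h2 : pre.length + 2 + 1 = (pre ++ [p2]).length + 2 := by simp
      rw [h1, h2, ih]
    by_cases hc : c = p1 ∧ c = p2
    · -- all three equal: nothing is appended on any branch
      obtain ⟨hc1, hc2⟩ := hc
      subst hc1; subst hc2
      rw [if_neg (by push_neg; exact ⟨rfl, rfl⟩)]
      rw [if_neg (fun hh => hh.1 rfl)]
      rw [if_neg (fun hh => hh.2.2 rfl)]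
      by_cases hend : pre.length + 2 = (pre ++ c :: c :: c :: rest').length - 1
      · rw [if_pos ⟨hend, rfl, rfl⟩, hstep]
        simp [pvSA]
      · rw [if_neg (fun hh => hend hh.1)]
        rw [if_neg (fun hh => hh.2.2 rfl)]
        rw [hstep]
        simp [pvSA]
    · -- not a third repetition: the first branch appends c
      rw [if_pos (by by_contra hno; push_neg at hno; exact hc ⟨hno.1, hno.2⟩)]
      rw [hstep]
      have : ¬ (some c = some p1 ∧ some c = some p2) := by
        intro hh; exact hc ⟨Option.some_inj.mp hh.1, Option.some_inj.mp hh.2⟩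
      simp only [pvSA]
      rw [if_neg this]
      simp

theorem portA_eq_simple (cs : List Char) :
    pvLoopA cs 2 (PySem.List.slice cs none (some 2)) = pvSimple cs := by
  have hsl : PySem.List.slice cs none (some 2) = cs.take 2 := by
    have := PySem.List.slice_to cs (b := (2 : Int)) (by omega)
    simpa using this
  rw [hsl]
  match cs with
  | [] => rw [pvLoopA]; rfl
  | [a] => rw [pvLoopA]; simp [pvSimple, pvSA]
  | a :: b :: rest =>
    have := pvLoopA_eq rest [] a b [a, b]
    simp only [List.nil_append, List.length_nil, Nat.zero_add] at this
    rw [show (a :: b :: rest).take 2 = [a, b] from rfl, this]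
    simp [pvSimple, pvSA]

-- every char of takeWhile (· == c) equals c
theorem takeWhile_eq_replicate (c : Char) (l : List Char) :
    l.takeWhile (· == c) = List.replicate (l.takeWhile (· == c)).length c := by
  rw [List.eq_replicate_iff]
  exact ⟨rfl, fun b hb => by simpa using List.mem_takeWhile_imp hb⟩

theorem dropWhile_head_ne (p : Char → Bool) (l : List Char) (d : Char) (r : List Char)
    (h : l.dropWhile p = d :: r) : p d = false := by
  induction l with
  | nil => simp at h
  | cons x xs ih =>
    rw [List.dropWhile_cons] at h
    split at h
    · exact ih h
    · next hx => cases h; simpa using hx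

-- B's run grouping computes the same state machine
theorem simple_eq_runs (n : Nat) : ∀ (l : List Char), l.length ≤ n → pvSimple l = pvRuns l := by
  induction n with
  | zero => intro l hl; have : l = [] := List.eq_nil_of_length_eq_zero (by omega); simp [this, pvSimple, pvRuns]
  | succ k ih =>
    intro l hl
    match l with
    | [] => simp [pvSimple, pvRuns]
    | c :: rest =>
      rw [pvRuns]
      simp only [List.span_eq_takeWhile_dropWhile]
      set tw := rest.takeWhile (· == c) with htw
      set dw := rest.dropWhile (· == c) with hdw
      have hsplit : rest = tw ++ dw := (List.takeWhile_append_dropWhile).symm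
      have hdwhead : ∀ d r, dw = d :: r → d ≠ c := by
        intro d r hh
        have := dropWhile_head_ne (· == c) rest d r (by rw [← hdw]; exact hh)
        simpa using this
      have hdwlen : dw.length ≤ rest.length := List.length_dropWhile_le _ _
      have hih : pvSimple dw = pvRuns dw := ih dw (by simp at hl; omega)
      match htw' : tw with
      | [] =>
        -- run of length 1
        have hrest : rest = dw := by simpa using hsplit
        rw [pvSimple, hrest]
        simp only [List.length_nil, Nat.zero_add]
        rw [show min 1 2 = 1 from by norm_num]
        rw [pvSA_fresh none c dw hdwhead, hih]
        rfl
      | e :: tw' =>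
        -- run of length ≥ 2
        have hrep := takeWhile_eq_replicate c rest
        rw [← htw] at hrep
        have hec : e = c := by
          have := hrep
          rw [List.length_cons, List.replicate_succ] at this
          exact (List.cons.injEq _ _ _ _).mp this |>.1
        have htw'' : tw' = List.replicate tw'.length c := by
          have := hrep
          rw [List.length_cons, List.replicate_succ] at this
          exact (List.cons.injEq _ _ _ _).mp this |>.2
        subst hec
        rw [pvSimple, hsplit]
        have : pvSA none (some e) ((e :: tw') ++ dw) = e :: pvSA (some e) (some e) (tw' ++ dw) := by
          simp [pvSA]
        rw [this]
        rw [show tw' ++ dw = List.replicate tw'.length e ++ dw from by rw [← htw'']]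
        rw [pvSA_replicate]
        rw [pvSA_fresh (some e) e dw hdwhead, hih]
        have hmin : min ((e :: tw').length + 1) 2 = 2 := by simp only [List.length_cons]; omega
        rw [hmin]
        rfl

-- ===== VERDICT (by name: the statement is the Claim_ definition above) =====
theorem remove_more_than_two_repetitions_spec : Claim_equal_remove_more_than_two_repetitions := by
  intro text _
  show remove_more_than_two_repetitions text = remove_more_than_two_repetitions_alt text
  unfold remove_more_than_two_repetitions remove_more_than_two_repetitions_alt
  rw [portA_eq_simple, simple_eq_runs text.toList.length text.toList le_rfl]
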